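-- pv_equiv track=rewrite | github.com/calvinchankf/GoogleKickStart | 2020/C/c.py | f
-- ===== SOURCE A (Python) =====
-- def isPerfectSquare(num):
--     left = 1
--     right = num
--     while left <= right:
--         mid = (left + right)//2
--         if mid*mid < num:
--             left = mid + 1
--         elif mid*mid > num:
--             right = mid - 1
--         else:
--             return True
--     return False
--
-- def f(arr):
--     res = 0
--     for i in range(len(arr)):
--         s = 0
--         for j in range(i, len(arr)):
--             s += arr[j]
--             if s == 0 or isPerfectSquare(s):
--                 res += 1
--     return res
-- ===== SOURCE B (Python) =====
-- def f(arr):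
--     # Prefix sums + hashmap of prefix-sum counts; for each endpoint enumerate
--     # candidate squares down to the minimum prefix seen (O(n*sqrt(S)) vs A's O(n^2 log S)).
--     res = 0
--     cnt = {0: 1}
--     p = 0
--     mn = 0
--     for x in arr:
--         p += x
--         k = 0
--         while p - k * k >= mn:
--             res += cnt.get(p - k * k, 0)
--             k += 1
--         cnt[p] = cnt.get(p, 0) + 1
--         if p < mn:
--             mn = p
--     return res
-- ===== Notes on version B (the rewrite author's own statement) =====
-- stated objective: faster
-- what changed: Replaced A's double loop over subarrays with a per-sum binary-search square test by a single pass over prefix sums keeping a hashmap of prefix-sum counts and, for each endpoint, enumerating candidate squares k^2 down to the minimum prefix seen.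
import Mathlib
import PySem

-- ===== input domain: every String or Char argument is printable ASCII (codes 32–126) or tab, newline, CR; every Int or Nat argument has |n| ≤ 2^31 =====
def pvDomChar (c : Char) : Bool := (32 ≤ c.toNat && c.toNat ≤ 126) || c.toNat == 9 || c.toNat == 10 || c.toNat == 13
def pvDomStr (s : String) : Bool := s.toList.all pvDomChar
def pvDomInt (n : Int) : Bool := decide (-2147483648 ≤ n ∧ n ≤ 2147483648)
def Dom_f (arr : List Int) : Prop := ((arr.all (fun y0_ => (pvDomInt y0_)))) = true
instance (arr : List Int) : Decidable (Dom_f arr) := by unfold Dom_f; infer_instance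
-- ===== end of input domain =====

-- B replaces A's double loop with a per-sum binary-search square test by one pass over prefix sums
-- keeping a hashmap of prefix-sum counts and enumerating candidate squares per endpoint (faster).


-- ===== PORT A =====
-- while left <= right: binary search for an integer root of num
def isqLoop (num left right : Int) : Bool :=
  if h : left ≤ right then
    let mid := PySem.Int.floordiv (left + right) 2
    if mid * mid < num then isqLoop num (mid + 1) right
    else if mid * mid > num then isqLoop num left (mid - 1)
    else true
  else false
termination_by (right + 1 - left).toNat
decreasing_by
  · have := PySem.Int.floordiv_two_mid_bounds h; omega
  · have := PySem.Int.floordiv_two_mid_bounds h; omega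

def isPerfectSquare (num : Int) : Bool := isqLoop num 1 num

def aStep (arr : List Int) (st : Int × Int) (j : Int) : Int × Int :=
  let s := st.1 + PySem.List.pyGetD arr j 0
  (s, if s == 0 || isPerfectSquare s then st.2 + 1 else st.2)

def f (arr : List Int) : Int :=
  (PySem.List.pyRange 0 arr.length 1).foldl
    (fun res i => ((PySem.List.pyRange i arr.length 1).foldl (aStep arr) (0, res)).2) 0

-- ===== PORT B =====
-- while p - k*k >= mn: add the stored count of the prefix value p - k*k
def sqLoop (p mn : Int) (cnt : PySem.Dict Int Int) (k : Nat) (res : Int) : Int :=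
  if h : mn ≤ p - (k : Int) * k then
    sqLoop p mn cnt (k + 1) (res + cnt.getD (p - (k : Int) * k) 0)
  else res
termination_by (p - (k : Int) * k + 1 - mn).toNat
decreasing_by
  have hexp : ((k : Int) + 1) * ((k : Int) + 1) = (k : Int) * k + 2 * (k : Int) + 1 := by ring
  push_cast
  rw [hexp]
  generalize hK : (k : Int) * (k : Int) = K at h ⊢
  omega

def bStep (st : Int × Int × Int × PySem.Dict Int Int) (x : Int) : Int × Int × Int × PySem.Dict Int Int :=
  let p := st.2.1 + x
  let res := sqLoop p st.2.2.1 st.2.2.2 0 st.1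
  let cnt := st.2.2.2.insert p (st.2.2.2.getD p 0 + 1)
  let mn := if p < st.2.2.1 then p else st.2.2.1
  (res, p, mn, cnt)

def f_alt (arr : List Int) : Int :=
  (arr.foldl bStep (0, 0, 0, PySem.Dict.empty.insert 0 1)).1

-- ===== PRECONDITION & SPEC =====
def Spec_f (arr : List Int) (out : Int) : Prop := out = f_alt arr
instance (arr : List Int) (out : Int) : Decidable (Spec_f arr out) := by unfold Spec_f; infer_instance

-- ===== CLAIM (what is proved, stated in full; the proofs are below) =====
def Claim_equal_f : Prop := ∀ (arr : List Int), Dom_f arr → Spec_f arr (f arr)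

-- ===== LEMMAS AND PROOFS =====

-- 's is a (nonnegative) perfect square'
def IsSq (s : Int) : Prop := ∃ j : Nat, (j : Int) * j = s

-- A's test of a subarray sum, as a named Bool predicate
def gbB (s : Int) : Bool := s == 0 || isPerfectSquare s

-- prefix sum P arr t = arr[0] + ... + arr[t-1]
def P (arr : List Int) (t : Nat) : Int := (arr.take t).sum

-- the prefixes P_0 .. P_t
def prefList (arr : List Int) (t : Nat) : List Int := (List.range (t + 1)).map (P arr)

-- 's = j*j for some j ≥ k' (bounded quantifier, hence a Bool)
def sqFrom (k : Nat) (s : Int) : Bool :=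
  (List.range (s.natAbs + 1)).any (fun j => decide (k ≤ j) && decide ((j : Int) * j = s))

-- B's counting, as a structural spec over the remaining suffix
def Bspec (p : Int) (L : List Int) : List Int → Int
  | [] => 0
  | x :: suf => ((L.countP (fun v => gbB ((p + x) - v))) : Int) + Bspec (p + x) (L ++ [p + x]) suf

theorem sqFrom_iff (k : Nat) (s : Int) :
    sqFrom k s = true ↔ ∃ j, j ∈ List.range (s.natAbs + 1) ∧ k ≤ j ∧ (j : Int) * j = s := by
  unfold sqFrom
  rw [List.any_eq_true]
  constructor
  · rintro ⟨j, hm, hb⟩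
    rw [Bool.and_eq_true, decide_eq_true_eq, decide_eq_true_eq] at hb
    exact ⟨j, hm, hb.1, hb.2⟩
  · rintro ⟨j, hm, h1, h2⟩
    refine ⟨j, hm, ?_⟩
    rw [Bool.and_eq_true, decide_eq_true_eq, decide_eq_true_eq]
    exact ⟨h1, h2⟩

theorem le_sq (j : Nat) : j ≤ j * j := by
  rcases Nat.eq_zero_or_pos j with rfl | h
  · simp
  · calc j = j * 1 := (Nat.mul_one j).symm
      _ ≤ j * j := Nat.mul_le_mul le_rfl h

theorem bool_ne_true_eq_false {b : Bool} (h : b ≠ true) : b = false := by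
  cases b
  · rfl
  · exact absurd rfl h

theorem P_succ (arr : List Int) (t : Nat) (h : t < arr.length) :
    P arr (t + 1) = P arr t + arr[t] := by
  unfold P
  rw [List.take_succ, List.sum_append, List.getElem?_eq_getElem h]
  simp

theorem isqLoop_iff (num : Int) : ∀ (n : Nat) (left right : Int), (right + 1 - left).toNat ≤ n →
    1 ≤ left →
    (∀ m : Int, 1 ≤ m → m * m = num → left ≤ m ∧ m ≤ right) →
    (isqLoop num left right = true ↔ ∃ m : Int, 1 ≤ m ∧ m * m = num) := by
  intro n
  induction n with
  | zero =>
    intro left right hn h1 hinv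
    have hlr : ¬ left ≤ right := by omega
    rw [isqLoop, dif_neg hlr]
    simp only [Bool.false_eq_true, false_iff]
    rintro ⟨m, hm1, hms⟩
    have := hinv m hm1 hms; omega
  | succ n ih =>
    intro left right hn h1 hinv
    by_cases hlr : left ≤ right
    · rw [isqLoop, dif_pos hlr]
      have hb := PySem.Int.floordiv_two_mid_bounds hlr
      set mid := PySem.Int.floordiv (left + right) 2 with hmid
      by_cases hlt : mid * mid < num
      · rw [if_pos hlt]
        apply ih
        · omega
        · omega
        · intro m hm1 hms
          refine ⟨?_, (hinv m hm1 hms).2⟩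
          by_contra hc
          push_neg at hc
          have hmm : m ≤ mid := by omega
          have : m * m ≤ mid * mid := mul_le_mul hmm hmm (by omega) (by omega)
          omega
      · rw [if_neg hlt]
        by_cases hgt : mid * mid > num
        · rw [if_pos hgt]
          apply ih
          · omega
          · exact h1
          · intro m hm1 hms
            refine ⟨(hinv m hm1 hms).1, ?_⟩
            by_contra hc
            push_neg at hc
            have hmm : mid ≤ m := by omega
            have : mid * mid ≤ m * m := mul_le_mul hmm hmm (by omega) (by omega)
            omega
        · rw [if_neg hgt]
          exact ⟨fun _ => ⟨mid, by omega, by omega⟩, fun _ => rfl⟩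
    · rw [isqLoop, dif_neg hlr]
      simp only [Bool.false_eq_true, false_iff]
      rintro ⟨m, hm1, hms⟩
      have := hinv m hm1 hms; omega

theorem isPerfectSquare_iff (s : Int) :
    isPerfectSquare s = true ↔ ∃ m : Int, 1 ≤ m ∧ m * m = s := by
  unfold isPerfectSquare
  refine isqLoop_iff s (s + 1 - 1).toNat 1 s le_rfl (by omega) ?_
  intro m hm1 hms
  refine ⟨hm1, ?_⟩
  have h2 : m * 1 ≤ m * m := mul_le_mul le_rfl hm1 (by omega) (by omega)
  rw [mul_one] at h2
  omega

theorem gbB_iff (s : Int) : gbB s = true ↔ IsSq s := by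
  unfold gbB IsSq
  rw [Bool.or_eq_true, beq_iff_eq, isPerfectSquare_iff]
  constructor
  · rintro (rfl | ⟨m, hm1, hms⟩)
    · exact ⟨0, by simp⟩
    · exact ⟨m.toNat, by rw [Int.toNat_of_nonneg (by omega)]; exact hms⟩
  · rintro ⟨j, hj⟩
    by_cases h0 : j = 0
    · subst h0; left; simpa using hj.symm
    · right
      refine ⟨(j : Int), ?_, hj⟩
      exact_mod_cast Nat.one_le_iff_ne_zero.mpr h0

theorem sqFrom_zero_iff (s : Int) : sqFrom 0 s = true ↔ IsSq s := by
  rw [sqFrom_iff]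
  unfold IsSq
  constructor
  · rintro ⟨j, _, _, hj⟩; exact ⟨j, hj⟩
  · rintro ⟨j, hj⟩
    refine ⟨j, ?_, Nat.zero_le j, hj⟩
    have hle := le_sq j
    have hc : ((j * j : Nat) : Int) = s := by push_cast; exact hj
    rw [List.mem_range]
    omega

theorem sqFrom_zero_eq_gbB (s : Int) : sqFrom 0 s = gbB s := by
  by_cases h : IsSq s
  · rw [(sqFrom_zero_iff s).mpr h, (gbB_iff s).mpr h]
  · have h1 : sqFrom 0 s = false := bool_ne_true_eq_false (fun hh => h ((sqFrom_zero_iff s).mp hh))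
    have h2 : gbB s = false := bool_ne_true_eq_false (fun hh => h ((gbB_iff s).mp hh))
    rw [h1, h2]

theorem countP_split (L : List Int) (t : Int) (q r : Int → Bool)
    (h : ∀ v ∈ L, (q v = true ↔ v = t ∨ r v = true) ∧ ¬(v = t ∧ r v = true)) :
    L.countP q = L.count t + L.countP r := by
  induction L with
  | nil => simp
  | cons x L ih =>
    have hx := h x (by simp)
    have ihL := ih (fun v hv => h v (by simp [hv]))
    simp only [List.countP_cons, List.count_cons, ihL]
    by_cases hxt : x = t
    · subst hxt
      have hq : q x = true := hx.1.mpr (Or.inl rfl)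
      have hr : r x = false := bool_ne_true_eq_false (fun hr => hx.2 ⟨rfl, hr⟩)
      simp [hq, hr]
      try omega
    · have hxt' : ¬ (t = x) := fun hh => hxt hh.symm
      by_cases hrx : r x = true
      · have hq : q x = true := hx.1.mpr (Or.inr hrx)
        simp [hq, hrx, hxt, hxt']
        try omega
      · have hq : q x = false := bool_ne_true_eq_false (fun hq => (hx.1.mp hq).elim hxt hrx)
        have hrx' : r x = false := bool_ne_true_eq_false hrx
        simp [hq, hrx', hxt, hxt']
        try omega

theorem countP_sqFrom_zero (L : List Int) (p mn : Int) (k : Nat)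
    (hm : ∀ v ∈ L, mn ≤ v) (hk : p - (k : Int) * k < mn) :
    L.countP (fun v => sqFrom k (p - v)) = 0 := by
  rw [List.countP_eq_zero]
  intro v hv hc
  rw [sqFrom_iff] at hc
  obtain ⟨j, _, hkj, hj⟩ := hc
  have h1 : (k : Int) * k ≤ (j : Int) * j := by exact_mod_cast Nat.mul_le_mul hkj hkj
  have h2 := hm v hv
  linarith

theorem sqLoop_spec (L : List Int) (p mn : Int) (cnt : PySem.Dict Int Int)
    (hc : ∀ v, cnt.getD v 0 = (L.count v : Int)) (hm : ∀ v ∈ L, mn ≤ v) :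
    ∀ (N k : Nat) (res : Int), (p - (k : Int) * k + 1 - mn).toNat ≤ N →
    sqLoop p mn cnt k res = res + ((L.countP (fun v => sqFrom k (p - v))) : Int) := by
  intro N
  induction N with
  | zero =>
    intro k res hN
    have h0 : p - (k : Int) * k + 1 - mn ≤ 0 := Int.toNat_eq_zero.mp (Nat.le_zero.mp hN)
    have hlt : ¬ mn ≤ p - (k : Int) * k := by linarith
    rw [sqLoop, dif_neg hlt, countP_sqFrom_zero L p mn k hm (by linarith)]
    simp
  | succ N ih =>
    intro k res hN
    by_cases hge : mn ≤ p - (k : Int) * k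
    · rw [sqLoop, dif_pos hge]
      have hdec : (p - ((k + 1 : Nat) : Int) * ((k + 1 : Nat) : Int) + 1 - mn).toNat ≤ N := by
        have hsq : ((k + 1 : Nat) : Int) * ((k + 1 : Nat) : Int)
            = (k : Int) * k + 2 * (k : Int) + 1 := by push_cast; ring
        rw [hsq]
        generalize hK : (k : Int) * (k : Int) = K at hN hge ⊢
        omega
      rw [ih (k + 1) _ hdec, hc]
      have hsplit : L.countP (fun v => sqFrom k (p - v))
          = L.count (p - (k : Int) * k) + L.countP (fun v => sqFrom (k + 1) (p - v)) := by
        apply countP_split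
        intro v _
        constructor
        · constructor
          · intro hq
            rw [sqFrom_iff] at hq
            obtain ⟨j, hjb, hkj, hj⟩ := hq
            rcases Nat.eq_or_lt_of_le hkj with heq | hlt2
            · left
              rw [← heq] at hj
              linarith
            · right
              rw [sqFrom_iff]
              exact ⟨j, hjb, hlt2, hj⟩
          · intro hor
            rcases hor with hvt | hrv
            · subst hvt
              rw [sqFrom_iff]
              have hpv : p - (p - (k : Int) * k) = (k : Int) * k := by ring
              have hsq : ((k * k : Nat) : Int) = (k : Int) * k := by push_cast; ring
              refine ⟨k, ?_, le_rfl, by ring⟩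
              rw [List.mem_range, hpv, ← hsq, Int.natAbs_natCast]
              have := le_sq k
              omega
            · rw [sqFrom_iff] at hrv ⊢
              obtain ⟨j, hjb, hkj, hj⟩ := hrv
              exact ⟨j, hjb, by omega, hj⟩
        · rintro ⟨hvt, hrv⟩
          subst hvt
          rw [sqFrom_iff] at hrv
          obtain ⟨j, hjb, hkj, hj⟩ := hrv
          have hcast : ((k + 1 : Nat) : Int) * ((k + 1 : Nat) : Int) ≤ (j : Int) * j := by
            exact_mod_cast Nat.mul_le_mul hkj hkj
          have hexp : ((k + 1 : Nat) : Int) * ((k + 1 : Nat) : Int)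
              = (k : Int) * k + 2 * (k : Int) + 1 := by push_cast; ring
          have hk0 : (0 : Int) ≤ (k : Int) := Int.natCast_nonneg k
          have hjeq : (j : Int) * j = (k : Int) * k := by linarith [hj]
          linarith
      rw [hsplit]
      push_cast
      ring
    · rw [sqLoop, dif_neg hge, countP_sqFrom_zero L p mn k hm (not_le.mp hge)]
      simp

theorem B_fold (suf : List Int) : ∀ (res p mn : Int) (cnt : PySem.Dict Int Int) (L : List Int),
    (∀ v, cnt.getD v 0 = (L.count v : Int)) → (∀ v ∈ L, mn ≤ v) →
    (suf.foldl bStep (res, p, mn, cnt)).1 = res + Bspec p L suf := by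
  induction suf with
  | nil => intro res p mn cnt L hc hm; simp [Bspec]
  | cons x suf ih =>
    intro res p mn cnt L hc hm
    have hres : sqLoop (p + x) mn cnt 0 res
        = res + ((L.countP (fun v => gbB ((p + x) - v))) : Int) := by
      have hfun : (fun v => sqFrom 0 ((p + x) - v)) = (fun v => gbB ((p + x) - v)) :=
        funext fun v => sqFrom_zero_eq_gbB ((p + x) - v)
      rw [sqLoop_spec L (p + x) mn cnt hc hm _ 0 res le_rfl, hfun]
    have hb : bStep (res, p, mn, cnt) x
        = (res + ((L.countP (fun v => gbB ((p + x) - v))) : Int), p + x,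
           (if p + x < mn then p + x else mn),
           cnt.insert (p + x) (cnt.getD (p + x) 0 + 1)) := by
      show (sqLoop (p + x) mn cnt 0 res, p + x,
            (if p + x < mn then p + x else mn),
            cnt.insert (p + x) (cnt.getD (p + x) 0 + 1)) = _
      rw [hres]
    have hc' : ∀ v, ((cnt.insert (p + x) (cnt.getD (p + x) 0 + 1)).getD v 0)
        = (((L ++ [p + x]).count v : Nat) : Int) := by
      intro v
      rw [PySem.Dict.getD_insert, List.count_append]
      by_cases hv : v = p + x
      · subst hv
        rw [if_pos rfl, hc]
        have h1 : (([p + x] : List Int).count (p + x)) = 1 := by simp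
        rw [h1]
        push_cast
        ring
      · rw [if_neg hv, hc]
        have h1 : (([p + x] : List Int).count v) = 0 :=
          List.count_eq_zero.mpr (by simp [hv])
        rw [h1]
        simp
    have hm' : ∀ v ∈ L ++ [p + x], (if p + x < mn then p + x else mn) ≤ v := by
      intro v hv
      rcases List.mem_append.mp hv with h | h
      · have := hm v h; split_ifs <;> omega
      · simp at h; subst h; split_ifs <;> omega
    rw [List.foldl_cons, hb, ih _ _ _ _ _ hc' hm']
    simp only [Bspec]
    ring

theorem Bspec_eq (arr : List Int) : ∀ (d t : Nat), arr.length - t ≤ d → t ≤ arr.length →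
    Bspec (P arr t) (prefList arr t) (arr.drop t) =
      ∑ j ∈ Finset.Ico t arr.length,
        ((prefList arr j).countP (fun v => gbB (P arr (j + 1) - v)) : Int) := by
  intro d
  induction d with
  | zero =>
    intro t h1 h2
    have ht : t = arr.length := by omega
    subst ht
    rw [List.drop_length]
    simp [Bspec]
  | succ d ih =>
    intro t h1 h2
    rcases Nat.eq_or_lt_of_le h2 with heq | hlt
    · subst heq
      rw [List.drop_length]
      simp [Bspec]
    · have hdrop : arr.drop t = arr[t] :: arr.drop (t + 1) := List.drop_eq_getElem_cons hlt
      rw [hdrop]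
      simp only [Bspec]
      have hPt : P arr t + arr[t] = P arr (t + 1) := (P_succ arr t hlt).symm
      have hpref : prefList arr t ++ [P arr (t + 1)] = prefList arr (t + 1) := by
        unfold prefList
        rw [List.range_succ (n := t + 1), List.map_append]
        simp
      rw [hPt, hpref, ih (t + 1) (by omega) (by omega)]
      rw [Finset.sum_eq_sum_Ico_succ_bot hlt]

theorem countP_map_range (m : Nat) (g : Nat → Int) (q : Int → Bool) :
    (((List.range m).map g).countP q : Int)
      = ∑ a ∈ Finset.range m, if q (g a) then (1 : Int) else 0 := by
  induction m with
  | zero => simp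
  | succ m ih =>
    rw [List.range_succ, List.map_append, List.countP_append, Finset.sum_range_succ, ← ih]
    by_cases h : q (g m)
    · simp [h, List.countP_cons]
    · simp [h, List.countP_cons]

theorem A_inner (arr : List Int) (i : Nat) : ∀ (d a : Nat) (res : Int),
    arr.length - a ≤ d → a ≤ arr.length →
    ((PySem.List.pyRange (a : Int) (arr.length : Int) 1).foldl (aStep arr) (P arr a - P arr i, res)).2
      = res + ∑ j ∈ Finset.Ico a arr.length,
          (if gbB (P arr (j + 1) - P arr i) then (1 : Int) else 0) := by
  intro d
  induction d with
  | zero =>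
    intro a res h1 h2
    have ha : a = arr.length := by omega
    subst ha
    rw [PySem.List.pyRange_one_eq_nil le_rfl]
    simp
  | succ d ih =>
    intro a res h1 h2
    rcases Nat.eq_or_lt_of_le h2 with heq | hlt
    · subst heq
      rw [PySem.List.pyRange_one_eq_nil le_rfl]
      simp
    · have hcast : ((a : Int) < (arr.length : Int)) := by exact_mod_cast hlt
      rw [PySem.List.pyRange_one_cons hcast]
      simp only [List.foldl_cons]
      have hget : PySem.List.pyGetD arr (a : Int) 0 = arr[a] := by
        rw [PySem.List.pyGetD_natCast, List.getD_eq_getElem?_getD, List.getElem?_eq_getElem hlt]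
        rfl
      have hstep : aStep arr (P arr a - P arr i, res) (a : Int)
          = (P arr (a + 1) - P arr i,
             res + if gbB (P arr (a + 1) - P arr i) then (1 : Int) else 0) := by
        show ((P arr a - P arr i) + PySem.List.pyGetD arr (a : Int) 0,
              if ((P arr a - P arr i) + PySem.List.pyGetD arr (a : Int) 0) == 0
                  || isPerfectSquare ((P arr a - P arr i) + PySem.List.pyGetD arr (a : Int) 0)
                then res + 1 else res) = _
        rw [hget]
        have hPa : P arr a - P arr i + arr[a] = P arr (a + 1) - P arr i := by
          rw [P_succ arr a hlt]; ring
        rw [hPa]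
        show (P arr (a + 1) - P arr i,
              if gbB (P arr (a + 1) - P arr i) then res + 1 else res) = _
        split_ifs with h
        · rfl
        · simp
      rw [hstep]
      have hcast1 : (a : Int) + 1 = ((a + 1 : Nat) : Int) := by push_cast; ring
      rw [hcast1, ih (a + 1) _ (by omega) hlt]
      rw [Finset.sum_eq_sum_Ico_succ_bot hlt]
      ring

theorem A_outer (arr : List Int) : ∀ (d b : Nat) (res : Int),
    arr.length - b ≤ d → b ≤ arr.length →
    ((PySem.List.pyRange (b : Int) (arr.length : Int) 1).foldl
      (fun res i => ((PySem.List.pyRange i (arr.length : Int) 1).foldl (aStep arr) (0, res)).2) res)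
      = res + ∑ i ∈ Finset.Ico b arr.length, ∑ j ∈ Finset.Ico i arr.length,
          (if gbB (P arr (j + 1) - P arr i) then (1 : Int) else 0) := by
  intro d
  induction d with
  | zero =>
    intro b res h1 h2
    have hb : b = arr.length := by omega
    subst hb
    rw [PySem.List.pyRange_one_eq_nil le_rfl]
    simp
  | succ d ih =>
    intro b res h1 h2
    rcases Nat.eq_or_lt_of_le h2 with heq | hlt
    · subst heq
      rw [PySem.List.pyRange_one_eq_nil le_rfl]
      simp
    · have hcast : ((b : Int) < (arr.length : Int)) := by exact_mod_cast hlt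
      rw [PySem.List.pyRange_one_cons hcast]
      simp only [List.foldl_cons]
      rw [Finset.sum_eq_sum_Ico_succ_bot hlt]
      have hinner := A_inner arr b (arr.length - b) b res (by omega) (le_of_lt hlt)
      rw [sub_self] at hinner
      rw [hinner]
      have hcast1 : (b : Int) + 1 = ((b + 1 : Nat) : Int) := by push_cast; ring
      rw [hcast1, ih (b + 1) _ (by omega) hlt]
      ring

theorem sum_swap_tri (n : Nat) (F : Nat → Nat → Int) :
    ∑ i ∈ Finset.range n, ∑ j ∈ Finset.Ico i n, F i j
      = ∑ j ∈ Finset.range n, ∑ i ∈ Finset.range (j + 1), F i j := by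
  calc ∑ i ∈ Finset.range n, ∑ j ∈ Finset.Ico i n, F i j
      = ∑ i ∈ Finset.range n, ∑ j ∈ Finset.range n, if i ≤ j then F i j else 0 := by
        refine Finset.sum_congr rfl fun i _ => ?_
        have h1 : Finset.Ico i n = (Finset.range n).filter (fun j => i ≤ j) := by
          ext j
          simp only [Finset.mem_Ico, Finset.mem_filter, Finset.mem_range]
          omega
        rw [h1, Finset.sum_filter]
    _ = ∑ j ∈ Finset.range n, ∑ i ∈ Finset.range n, if i ≤ j then F i j else 0 :=
        Finset.sum_comm
    _ = ∑ j ∈ Finset.range n, ∑ i ∈ Finset.range (j + 1), F i j := by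
        refine Finset.sum_congr rfl fun j hj => ?_
        have hjn := Finset.mem_range.mp hj
        have h2 : Finset.range (j + 1) = (Finset.range n).filter (fun i => i ≤ j) := by
          ext i
          simp only [Finset.mem_filter, Finset.mem_range]
          omega
        rw [h2, Finset.sum_filter]

-- ===== VERDICT (by name: the statement is the Claim_ definition above) =====
theorem f_spec : Claim_equal_f := by
  unfold Claim_equal_f
  intro arr _
  unfold Spec_f f
  have hA := A_outer arr arr.length 0 0 (by omega) (by omega)
  rw [Nat.cast_zero] at hA
  rw [hA]
  have hB0 : f_alt arr = 0 + Bspec 0 [0] arr := by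
    unfold f_alt
    apply B_fold
    · intro v
      rw [PySem.Dict.getD_insert]
      by_cases hv : v = 0
      · subst hv; simp
      · rw [if_neg hv, PySem.Dict.getD_empty,
            List.count_eq_zero.mpr (by simp [hv])]
        simp
    · intro v hv
      simp at hv
      omega
  have hB1 := Bspec_eq arr arr.length 0 (by omega) (by omega)
  have hpl0 : prefList arr 0 = [0] := by simp [prefList, P]
  have hP0 : P arr 0 = 0 := rfl
  rw [hP0, hpl0, List.drop_zero, ← Finset.range_eq_Ico] at hB1
  simp only [prefList] at hB1
  rw [hB0, hB1, ← Finset.range_eq_Ico]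
  congr 1
  rw [sum_swap_tri arr.length (fun i j => if gbB (P arr (j + 1) - P arr i) then (1 : Int) else 0)]
  refine Finset.sum_congr rfl fun j hj => ?_
  exact (countP_map_range (j + 1) (P arr) (fun v => gbB (P arr (j + 1) - v))).symm
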